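-- pv_equiv track=rewrite | github.com/poio90/mutants | funciones.py | dna_valido
-- ===== SOURCE A (Python) =====
-- def dna_valido(dna):
--     '''
--         Devuelve true si dna cumple con las condiciones
--         de la base nitrogenada del ADN
--     '''
--     es_valida = True
--     if len(dna) >= 4:
--         for i in range(len(dna)):
--             if len(dna) != len(dna[i]):
--                 es_valida = False
--             else:
--                 for j in range(len(dna[i])):
--                     if dna[i][j] not in 'ACGT':
--                         es_valida = False
--                         break
--     return es_valida
-- ===== SOURCE B (Python) =====
-- def dna_valido(dna):
--     '''
--         Devuelve true si dna cumple con las condiciones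
--         de la base nitrogenada del ADN
--     '''
--     if len(dna) < 4:
--         return True
--     n = len(dna)
--     if any(len(row) != n for row in dna):
--         return False
--     return set(''.join(dna)) <= set('ACGT')
-- ===== Notes on version B (the rewrite author's own statement) =====
-- stated objective: simpler
-- what changed: Replaces the interleaved per-cell loop with a break flag by a guard, one length-check pass over the rows, and a single set-subset test of all characters of the joined matrix against set('ACGT'); measured constant-factor speedup from C-level join/set operations replacing per-character Python iteration.
import Mathlib
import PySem

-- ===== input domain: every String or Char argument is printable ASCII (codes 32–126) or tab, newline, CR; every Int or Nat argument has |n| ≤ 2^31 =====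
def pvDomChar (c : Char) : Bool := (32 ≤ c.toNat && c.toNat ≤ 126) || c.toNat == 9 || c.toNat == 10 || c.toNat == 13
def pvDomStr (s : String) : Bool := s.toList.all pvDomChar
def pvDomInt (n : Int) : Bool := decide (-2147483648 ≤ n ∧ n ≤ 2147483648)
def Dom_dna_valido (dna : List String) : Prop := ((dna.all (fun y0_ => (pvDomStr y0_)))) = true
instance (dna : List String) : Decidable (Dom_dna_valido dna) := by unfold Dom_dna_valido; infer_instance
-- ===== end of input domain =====

-- B replaces A's interleaved per-cell break loop by a length-check pass plus one
-- set-subset test of all characters against {'A','C','G','T'} (objective: simpler).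

-- ===== PORT A =====
-- inner loop over the characters of one row; 'break' = stop and return False
-- (dna[i][j] is a single character, so «dna[i][j] not in 'ACGT'» is character membership — exact here)
def dnaRowLoopA : List Char → Bool → Bool
  | [], es => es
  | c :: rest, es =>
      if !(("ACGT".toList).contains c) then false
      else dnaRowLoopA rest es

-- outer loop over the rows, threading the flag es_valida
def dnaLoopA (n : Int) : List String → Bool → Bool
  | [], es => es
  | row :: rest, es =>
      if n ≠ PySem.Str.len row then dnaLoopA n rest false
      else dnaLoopA n rest (dnaRowLoopA row.toList es)

def dna_valido (dna : List String) : Bool :=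
  if (dna.length : Int) ≥ 4 then dnaLoopA (dna.length : Int) dna true else true

-- ===== PORT B =====
def dna_valido_alt (dna : List String) : Bool :=
  if (dna.length : Int) < 4 then true
  else if dna.any (fun row => PySem.Str.len row ≠ (dna.length : Int)) then false
  else PySem.Set.issubset (PySem.Set.ofList (PySem.Str.join "" dna).toList)
         (PySem.Set.ofList "ACGT".toList)

-- ===== PRECONDITION & SPEC =====
def Spec_dna_valido (dna : List String) (out : Bool) : Prop := out = dna_valido_alt dna
instance (dna : List String) (out : Bool) : Decidable (Spec_dna_valido dna out) := by unfold Spec_dna_valido; infer_instance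

-- ===== CLAIM (what is proved, stated in full; the proofs are below) =====
def Claim_equal_dna_valido : Prop := ∀ (dna : List String), Dom_dna_valido dna → Spec_dna_valido dna (dna_valido dna)

-- ===== LEMMAS AND PROOFS =====

theorem joinEmptySep (parts : List (List Char)) :
    PySem.Chars.join [] parts = parts.flatten := by
  induction parts with
  | nil => simp [PySem.Chars.join_nil]
  | cons x rest ih =>
      cases rest with
      | nil => simp [PySem.Chars.join_singleton]
      | cons y r => simp [PySem.Chars.join_cons_cons] at ih ⊢; simp [ih]

theorem dnaRowLoopA_eq (cs : List Char) (es : Bool) :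
    dnaRowLoopA cs es = (es && cs.all (fun c => ("ACGT".toList).contains c)) := by
  induction cs generalizing es with
  | nil => simp [dnaRowLoopA]
  | cons c rest ih =>
      rw [dnaRowLoopA, List.all_cons]
      cases hc : ("ACGT".toList).contains c
      · simp
      · simp [ih]

theorem dnaLoopA_eq (n : Int) (rows : List String) (es : Bool) :
    dnaLoopA n rows es =
      (es && rows.all (fun row =>
        decide (PySem.Str.len row = n) && row.toList.all (fun c => ("ACGT".toList).contains c))) := by
  induction rows generalizing es with
  | nil => simp [dnaLoopA]
  | cons row rest ih =>
      rw [dnaLoopA, List.all_cons]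
      by_cases h : n = PySem.Str.len row
      · rw [if_neg (by simp [h]), ih, dnaRowLoopA_eq, h]
        cases es <;> simp
      · rw [if_pos h, ih]
        simp
        intro _ hcontra
        exact absurd hcontra (by simpa using Ne.symm h)

-- ===== VERDICT (by name: the statement is the Claim_ definition above) =====
theorem dna_valido_spec : Claim_equal_dna_valido := by
  intro dna _
  unfold Spec_dna_valido dna_valido dna_valido_alt
  by_cases h4 : (dna.length : Int) ≥ 4
  · have h4' : ¬ ((dna.length : Int) < 4) := not_lt.mpr h4
    rw [if_pos h4, if_neg h4', dnaLoopA_eq, Bool.true_and]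
    by_cases hlen : dna.any (fun row => PySem.Str.len row ≠ (dna.length : Int)) = true
    · rw [if_pos hlen]
      rw [List.any_eq_true] at hlen
      obtain ⟨row, hmem, hne⟩ := hlen
      simp only [decide_eq_true_eq] at hne
      rw [List.all_eq_false]
      have hne' : ¬ (row.length = dna.length) := by simpa using hne
      exact ⟨row, hmem, by simp [hne']⟩
    · rw [if_neg hlen]
      have hall : ∀ row ∈ dna, PySem.Str.len row = (dna.length : Int) := by
        intro row hr
        by_contra hne
        exact hlen (List.any_eq_true.mpr ⟨row, hr, by simpa using hne⟩)
      rw [Bool.eq_iff_iff, List.all_eq_true, PySem.Set.issubset_iff]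
      simp only [PySem.Set.mem_ofList, PySem.Str.toList_join, show ("".toList : List Char) = [] from rfl, joinEmptySep, List.mem_flatten]
      constructor
      · intro hrows c hc
        obtain ⟨l, hl, hcl⟩ := hc
        obtain ⟨row, hr, rfl⟩ := List.mem_map.mp hl
        have := hrows row hr
        simp only [Bool.and_eq_true, List.all_eq_true] at this
        simpa using this.2 c hcl
      · intro hsub row hr
        simp only [Bool.and_eq_true, decide_eq_true_eq]
        refine ⟨hall row hr, ?_⟩
        rw [List.all_eq_true]
        intro c hc
        have : c ∈ "ACGT".toList :=
          hsub c ⟨row.toList, List.mem_map_of_mem hr, hc⟩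
        simpa using this
  · rw [if_neg h4, if_pos (lt_of_not_ge h4)]
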